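-- pv_equiv track=rewrite | github.com/Malenczuk/LogicSimplify | Malenczuk_Marcin.py | convert_to_logic
-- ===== SOURCE A (Python) =====
-- def convert_to_logic(terms, expr_vars):
--     """
--     :param terms: essential implicants of logic funtion
--     :param expr_vars: variables of logic funtion
--     :return: string form of logic funtion
--     """
--     results = []
--     n_terms = len(terms)
--     for t in terms:
--         if len(t) == t.count('-'):
--             return 'T'
--         and_result = []
--         xor_result = []
--         xor = t.count('^')
--         xnor = t.count('~')
--         fixed = t.count('1') + t.count('0')
--         brackets = n_terms > 1 and (fixed > 1 or (fixed > 0 and xor + xnor > 0))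
--         for i in [ic[0] for ic in enumerate(t) if ic[1] == '1']:
--             and_result.append(expr_vars[i])
--         for i in [ic[0] for ic in enumerate(t) if ic[1] == '0']:
--             and_result.append('~' + expr_vars[i])
--         if xor or xnor:
--             for i in [ic[0] for ic in enumerate(t) if ic[1] in '~^']:
--                 xor_result.append(expr_vars[i])
--             if xnor:
--                 and_result.append('~(' + '^'.join(xor_result) + ')')
--             else:
--                 and_result.append('^'.join(xor_result))
--         if brackets:
--             results.append('(' + '&'.join(and_result) + ')')
--         else:
--             results.append('&'.join(and_result))
--     return '|'.join(results)
-- ===== SOURCE B (Python) =====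
-- def convert_to_logic(terms, expr_vars):
--     """Single-pass per term: one scan over enumerate(t) fills the buckets and counters."""
--     results = []
--     many = len(terms) > 1
--     for t in terms:
--         ones = []
--         zeros = []
--         xors = []
--         dashes = n1 = n0 = nxor = nxnor = 0
--         for i, c in enumerate(t):
--             if c == '-':
--                 dashes += 1
--             elif c == '1':
--                 n1 += 1
--                 ones.append(expr_vars[i])
--             elif c == '0':
--                 n0 += 1
--                 zeros.append('~' + expr_vars[i])
--             elif c == '^':
--                 nxor += 1
--                 xors.append(expr_vars[i])
--             elif c == '~':
--                 nxnor += 1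
--                 xors.append(expr_vars[i])
--         if dashes == len(t):
--             return 'T'
--         parts = ones + zeros
--         if xors:
--             clause = '^'.join(xors)
--             parts.append('~(' + clause + ')' if nxnor else clause)
--         s = '&'.join(parts)
--         fixed = n1 + n0
--         if many and (fixed > 1 or (fixed > 0 and nxor + nxnor > 0)):
--             s = '(' + s + ')'
--         results.append(s)
--     return '|'.join(results)
-- ===== Notes on version B (the rewrite author's own statement) =====
-- stated objective: faster
-- what changed: A makes about eight passes over each term (five count() calls plus three enumerate-filter comprehensions); B scans each term once, dispatching every character into ones/zeros/xor buckets and counters in a single loop, then assembles the clause from those buckets.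
import Mathlib
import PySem

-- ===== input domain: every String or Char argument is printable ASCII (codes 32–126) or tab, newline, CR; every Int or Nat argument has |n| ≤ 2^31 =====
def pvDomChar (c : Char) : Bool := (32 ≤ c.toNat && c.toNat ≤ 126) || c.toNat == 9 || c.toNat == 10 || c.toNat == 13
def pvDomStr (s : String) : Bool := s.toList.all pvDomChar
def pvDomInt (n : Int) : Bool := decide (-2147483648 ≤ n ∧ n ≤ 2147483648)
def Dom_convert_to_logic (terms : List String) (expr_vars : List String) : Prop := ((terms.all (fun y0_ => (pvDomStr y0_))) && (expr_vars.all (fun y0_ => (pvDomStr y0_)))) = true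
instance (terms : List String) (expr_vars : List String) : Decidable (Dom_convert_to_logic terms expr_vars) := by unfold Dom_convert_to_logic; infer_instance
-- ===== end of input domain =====

-- B replaces A's ~8 passes per term (five count() calls plus three filter comprehensions) by ONE scan
-- of the term that fills the ones/zeros/xor buckets and the counters (measured faster in a timing run).

-- ===== PORT A =====
-- literal port of A's loop over `terms` with the accumulated `results`
def aLoop (n_terms : Nat) (expr_vars : List String) : List String → List String → String
  | [], results => PySem.Str.join "|" results.reverse
  | t :: rest, results =>
    if PySem.Str.len t = (PySem.Str.count t "-" : Int) then "T"
    else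
      let xor := PySem.Str.count t "^"
      let xnor := PySem.Str.count t "~"
      let fixed := PySem.Str.count t "1" + PySem.Str.count t "0"
      let brackets := decide (n_terms > 1) && (decide (fixed > 1) || (decide (fixed > 0) && decide (xor + xnor > 0)))
      let and_result : List String :=
        ((PySem.List.enumerate t.toList 0).filter (fun ic => ic.2 == '1')).map
          (fun ic => PySem.List.pyGetD expr_vars ic.1 "") ++
        ((PySem.List.enumerate t.toList 0).filter (fun ic => ic.2 == '0')).map
          (fun ic => "~" ++ PySem.List.pyGetD expr_vars ic.1 "")
      let and_result :=
        if xor ≠ 0 ∨ xnor ≠ 0 then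
          let xor_result : List String :=
            ((PySem.List.enumerate t.toList 0).filter (fun ic => ic.2 == '~' || ic.2 == '^')).map
              (fun ic => PySem.List.pyGetD expr_vars ic.1 "")
          if xnor ≠ 0 then and_result ++ ["~(" ++ PySem.Str.join "^" xor_result ++ ")"]
          else and_result ++ [PySem.Str.join "^" xor_result]
        else and_result
      let r := if brackets then "(" ++ PySem.Str.join "&" and_result ++ ")" else PySem.Str.join "&" and_result
      aLoop n_terms expr_vars rest (r :: results)

def convert_to_logic (terms : List String) (expr_vars : List String) : String :=
  aLoop terms.length expr_vars terms []

-- ===== PORT B =====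
-- state of B's single pass over one term
structure BSt where
  ones : List String
  zeros : List String
  xors : List String
  dashes : Nat
  n1 : Nat
  n0 : Nat
  nxor : Nat
  nxnor : Nat
deriving Repr, DecidableEq

def bStep (expr_vars : List String) (st : BSt) (ic : Int × Char) : BSt :=
  if ic.2 = '-' then { st with dashes := st.dashes + 1 }
  else if ic.2 = '1' then { st with n1 := st.n1 + 1, ones := st.ones ++ [PySem.List.pyGetD expr_vars ic.1 ""] }
  else if ic.2 = '0' then { st with n0 := st.n0 + 1, zeros := st.zeros ++ ["~" ++ PySem.List.pyGetD expr_vars ic.1 ""] }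
  else if ic.2 = '^' then { st with nxor := st.nxor + 1, xors := st.xors ++ [PySem.List.pyGetD expr_vars ic.1 ""] }
  else if ic.2 = '~' then { st with nxnor := st.nxnor + 1, xors := st.xors ++ [PySem.List.pyGetD expr_vars ic.1 ""] }
  else st

def bLoop (many : Bool) (expr_vars : List String) : List String → List String → String
  | [], results => PySem.Str.join "|" results.reverse
  | t :: rest, results =>
    let st := (PySem.List.enumerate t.toList 0).foldl (bStep expr_vars) ⟨[], [], [], 0, 0, 0, 0, 0⟩
    if (st.dashes : Int) = PySem.Str.len t then "T"
    else
      let parts := st.ones ++ st.zeros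
      let parts :=
        if st.xors ≠ [] then
          parts ++ [if st.nxnor ≠ 0 then "~(" ++ PySem.Str.join "^" st.xors ++ ")" else PySem.Str.join "^" st.xors]
        else parts
      let s := PySem.Str.join "&" parts
      let fixed := st.n1 + st.n0
      let s := if many && (decide (fixed > 1) || (decide (fixed > 0) && decide (st.nxor + st.nxnor > 0))) then "(" ++ s ++ ")" else s
      bLoop many expr_vars rest (s :: results)

def convert_to_logic_alt (terms : List String) (expr_vars : List String) : String :=
  bLoop (decide (terms.length > 1)) expr_vars terms []

-- ===== PRECONDITION & SPEC =====
-- Pre_ excludes exactly the inputs on which Python A raises IndexError: a term whose character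
-- '1'/'0'/'^'/'~' sits at a position ≥ len(expr_vars), reached before any all-'-' term ends the loop early.
def pvNeedOK (expr_vars : List String) (t : String) : Bool :=
  (PySem.List.enumerate t.toList 0).all
    (fun ic => !(ic.2 == '1' || ic.2 == '0' || ic.2 == '^' || ic.2 == '~') || decide (ic.1 < (expr_vars.length : Int)))

def pvPreB (expr_vars : List String) : List String → Bool
  | [] => true
  | t :: rest => pvNeedOK expr_vars t && (t.toList.all (· == '-') || pvPreB expr_vars rest)

def Pre_convert_to_logic (terms : List String) (expr_vars : List String) : Prop :=
  pvPreB expr_vars terms = true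
instance (terms : List String) (expr_vars : List String) : Decidable (Pre_convert_to_logic terms expr_vars) := by unfold Pre_convert_to_logic; infer_instance

def pvWitness_convert_to_logic : List String × List String := (["10-", "-^~"], ["a", "b", "c"])

def Spec_convert_to_logic (terms : List String) (expr_vars : List String) (out : String) : Prop := out = convert_to_logic_alt terms expr_vars
instance (terms : List String) (expr_vars : List String) (out : String) : Decidable (Spec_convert_to_logic terms expr_vars out) := by unfold Spec_convert_to_logic; infer_instance

-- ===== CLAIM (what is proved, stated in full; the proofs are below) =====
def Claim_equal_convert_to_logic : Prop := ∀ (terms : List String) (expr_vars : List String), Dom_convert_to_logic terms expr_vars → Pre_convert_to_logic terms expr_vars → Spec_convert_to_logic terms expr_vars (convert_to_logic terms expr_vars)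

-- ===== LEMMAS AND PROOFS =====

-- a single-character needle: Python's s.count(c) is the plain character count
lemma count_go_single (c : Char) : ∀ (l : List Char) (fuel acc : Nat), l.length ≤ fuel →
    PySem.Chars.count.go [c] fuel l acc = acc + l.count c := by
  intro l
  induction l with
  | nil => intro fuel acc _; cases fuel <;> simp [PySem.Chars.count.go]
  | cons h t ih =>
    intro fuel acc hle
    cases fuel with
    | zero => simp at hle
    | succ f =>
      simp only [PySem.Chars.count.go, List.isPrefixOf, List.count_cons]
      have hf : t.length ≤ f := by simpa using hle
      by_cases hc : (c == h) = true
      · have hch : h = c := ((beq_iff_eq).mp hc).symm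
        simp [hch, ih f (acc + 1) hf, List.drop]
        omega
      · have hch : ¬h = c := fun hh => hc (by simp [hh])
        simp [hc, hch, ih f acc hf]

lemma count_single (cs : List Char) (c : Char) : PySem.Chars.count cs [c] = cs.count c := by
  simp [PySem.Chars.count, count_go_single c cs cs.length 0 le_rfl]

lemma countP_snd_enum (cs : List Char) (c : Char) (s : Int) :
    (PySem.List.enumerate cs s).countP (fun ic => ic.2 == c) = cs.count c := by
  have h := PySem.List.map_snd_enumerate cs s
  calc (PySem.List.enumerate cs s).countP (fun ic => ic.2 == c)
      = ((PySem.List.enumerate cs s).map (fun ic => ic.2)).countP (fun x => x == c) := by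
        rw [List.countP_map]; rfl
    _ = cs.count c := by rw [h]; rfl

lemma scan_spec (ev : List String) (l : List (Int × Char)) (st : BSt) :
    l.foldl (bStep ev) st =
      ⟨st.ones ++ (l.filter (fun ic => ic.2 == '1')).map (fun ic => PySem.List.pyGetD ev ic.1 ""),
       st.zeros ++ (l.filter (fun ic => ic.2 == '0')).map (fun ic => "~" ++ PySem.List.pyGetD ev ic.1 ""),
       st.xors ++ (l.filter (fun ic => ic.2 == '~' || ic.2 == '^')).map (fun ic => PySem.List.pyGetD ev ic.1 ""),
       st.dashes + l.countP (fun ic => ic.2 == '-'),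
       st.n1 + l.countP (fun ic => ic.2 == '1'),
       st.n0 + l.countP (fun ic => ic.2 == '0'),
       st.nxor + l.countP (fun ic => ic.2 == '^'),
       st.nxnor + l.countP (fun ic => ic.2 == '~')⟩ := by
  induction l generalizing st with
  | nil => simp
  | cons ic rest ih =>
    obtain ⟨i, c⟩ := ic
    simp only [List.foldl_cons, ih, List.filter_cons, List.countP_cons]
    by_cases h1 : c = '-' <;> by_cases h2 : c = '1' <;> by_cases h3 : c = '0' <;>
      by_cases h4 : c = '^' <;> by_cases h5 : c = '~' <;>
      simp_all [bStep] <;> omega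

lemma loops_eq (ev : List String) (nt : Nat) : ∀ (ts results : List String),
    aLoop nt ev ts results = bLoop (decide (nt > 1)) ev ts results := by
  intro ts
  induction ts with
  | nil => intro results; rfl
  | cons t rest ih =>
    intro results
    have ed : PySem.Str.count t "-" = t.toList.count '-' := count_single t.toList '-'
    have e1 : PySem.Str.count t "1" = t.toList.count '1' := count_single t.toList '1'
    have e0 : PySem.Str.count t "0" = t.toList.count '0' := count_single t.toList '0'
    have ex : PySem.Str.count t "^" = t.toList.count '^' := count_single t.toList '^'
    have en : PySem.Str.count t "~" = t.toList.count '~' := count_single t.toList '~'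
    have hen : ∀ c : Char, (PySem.List.enumerate t.toList 0).countP (fun ic => ic.2 == c) = t.toList.count c :=
      fun c => countP_snd_enum t.toList c 0
    simp only [aLoop, bLoop, scan_spec, List.nil_append, Nat.zero_add, PySem.Str.len,
      ed, e1, e0, ex, en, hen]
    have hxx : ((((PySem.List.enumerate t.toList 0).filter (fun ic => ic.2 == '~' || ic.2 == '^')).map
        (fun ic => PySem.List.pyGetD ev ic.1 "")) ≠ []) ↔
        (t.toList.count '^' ≠ 0 ∨ t.toList.count '~' ≠ 0) := by
      rw [← hen '^', ← hen '~']
      simp only [ne_eq, List.map_eq_nil_iff, List.filter_eq_nil_iff, List.countP_eq_zero]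
      push Not
      constructor
      · rintro ⟨a, ha, hp⟩
        rcases Bool.or_eq_true_iff.mp hp with h | h
        · exact Or.inr ⟨a, ha, h⟩
        · exact Or.inl ⟨a, ha, h⟩
      · rintro (⟨a, ha, hp⟩ | ⟨a, ha, hp⟩)
        · exact ⟨a, ha, by simp [hp]⟩
        · exact ⟨a, ha, by simp [hp]⟩
    by_cases hd : t.toList.count '-' = t.toList.length
    · have hA : ((t.toList.length : Int) = (t.toList.count '-' : Nat)) := by exact_mod_cast hd.symm
      have hB : ((t.toList.count '-' : Nat) : Int) = (t.toList.length : Int) := by exact_mod_cast hd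
      simp only [if_pos hA, if_pos hB]
    · have hA : ¬((t.toList.length : Int) = (t.toList.count '-' : Nat)) := fun h => hd (by exact_mod_cast h.symm)
      have hB : ¬(((t.toList.count '-' : Nat) : Int) = (t.toList.length : Int)) := fun h => hd (by exact_mod_cast h)
      simp only [if_neg hA, if_neg hB]
      rw [if_congr hxx rfl rfl]
      rw [ih]
      congr 2
      split_ifs <;> rfl

-- ===== VERDICT (by name: the statement is the Claim_ definition above) =====
theorem convert_to_logic_spec : Claim_equal_convert_to_logic := by
  intro terms ev _ _
  unfold Spec_convert_to_logic convert_to_logic convert_to_logic_alt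
  exact loops_eq ev terms.length terms []
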